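-- pv_equiv track=rewrite | github.com/Rakshith-Reddy-K/hotel-iq | model_pipeline/backend/agents/booking_collection_agent.py | _fuzzy_pick_room_type
-- ===== SOURCE A (Python) =====
-- from typing import Dict, Any, List
--
-- def _fuzzy_pick_room_type(user_text: str, options: List[str]) -> str | None:
--     """
--     Try to match the user's message to one of the room types.
--     """
--     text = user_text.lower()
--
--     # Exact substring
--     for opt in options:
--         if opt.lower() in text:
--             return opt
--
--     # Partial word/keyword match
--     for opt in options:
--         words = [w for w in opt.lower().split() if len(w) > 3]
--         if any(w in text for w in words):
--             return opt
--
--     return None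
-- ===== SOURCE B (Python) =====
-- def _fuzzy_pick_room_type(user_text, options):
--     """
--     Try to match the user's message to one of the room types.
--     Single scoring pass: 0 = exact substring, 1 = keyword match, 2 = no match;
--     keep the first strictly-better-scoring option, so exact beats keyword globally.
--     """
--     text = user_text.lower()
--
--     def _score(opt):
--         o = opt.lower()
--         if o in text:
--             return 0
--         if any(w in text for w in o.split() if len(w) > 3):
--             return 1
--         return 2
--
--     best = None  # (score, option), only kept while score < 2
--     for opt in options:
--         s = _score(opt)
--         if s < 2 and (best is None or s < best[0]):
--             best = (s, opt)
--     return best[1] if best is not None else None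
-- ===== Notes on version B (the rewrite author's own statement) =====
-- stated objective: alternative
-- what changed: Replaced A's two sequential scans (exact-substring pass, then keyword pass) by a single pass that scores each option (0 exact, 1 keyword, 2 none) and keeps the first strictly-better-scoring option.
import Mathlib
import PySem

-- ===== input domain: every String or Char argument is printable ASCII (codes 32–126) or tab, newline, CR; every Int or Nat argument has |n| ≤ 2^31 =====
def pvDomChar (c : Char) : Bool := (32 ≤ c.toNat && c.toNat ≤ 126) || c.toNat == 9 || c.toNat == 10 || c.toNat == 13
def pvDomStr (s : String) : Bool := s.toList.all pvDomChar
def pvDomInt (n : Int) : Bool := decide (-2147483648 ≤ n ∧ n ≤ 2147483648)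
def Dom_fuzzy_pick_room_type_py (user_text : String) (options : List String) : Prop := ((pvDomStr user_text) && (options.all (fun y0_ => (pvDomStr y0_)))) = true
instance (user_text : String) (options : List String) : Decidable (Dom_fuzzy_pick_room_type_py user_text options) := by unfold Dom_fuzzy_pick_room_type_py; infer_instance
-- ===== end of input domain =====

-- B replaces A's two sequential scans by one scoring pass keeping the first strictly-better option (alternative decomposition, same cost).

-- ===== PORT A =====
def fuzzy_pick_room_type_py (user_text : String) (options : List String) : Option String :=
  let text := PySem.Str.lower user_text
  match options.find? (fun opt => PySem.Str.isIn (PySem.Str.lower opt) text) with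
  | some opt => some opt
  | none =>
    match options.find? (fun opt =>
        ((PySem.Str.split₀ (PySem.Str.lower opt)).filter (fun w => PySem.Str.len w > 3)).any
          (fun w => PySem.Str.isIn w text)) with
    | some opt => some opt
    | none => none

-- ===== PORT B =====
def pvScore (text : String) (opt : String) : Nat :=
  let o := PySem.Str.lower opt
  if PySem.Str.isIn o text then 0
  else if ((PySem.Str.split₀ o).filter (fun w => PySem.Str.len w > 3)).any
      (fun w => PySem.Str.isIn w text) then 1
  else 2

def pvBestLoop (text : String) (best : Option (Nat × String)) (l : List String) : Option (Nat × String) :=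
  match l with
  | [] => best
  | opt :: rest =>
    let s := pvScore text opt
    let keep : Bool := decide (s < 2) && (match best with | none => true | some b => decide (s < b.1))
    pvBestLoop text (if keep then some (s, opt) else best) rest

def fuzzy_pick_room_type_py_alt (user_text : String) (options : List String) : Option String :=
  let text := PySem.Str.lower user_text
  (pvBestLoop text none options).map (fun b => b.2)

-- ===== PRECONDITION & SPEC =====
def Spec_fuzzy_pick_room_type_py (user_text : String) (options : List String) (out : Option String) : Prop := out = fuzzy_pick_room_type_py_alt user_text options
instance (user_text : String) (options : List String) (out : Option String) : Decidable (Spec_fuzzy_pick_room_type_py user_text options out) := by unfold Spec_fuzzy_pick_room_type_py; infer_instance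

-- ===== CLAIM (what is proved, stated in full; the proofs are below) =====
def Claim_equal_fuzzy_pick_room_type_py : Prop := ∀ (user_text : String) (options : List String), Dom_fuzzy_pick_room_type_py user_text options → Spec_fuzzy_pick_room_type_py user_text options (fuzzy_pick_room_type_py user_text options)

-- ===== LEMMAS AND PROOFS =====

theorem pvScore_le (text o : String) : pvScore text o ≤ 2 := by
  unfold pvScore; dsimp only; split_ifs <;> simp

theorem pvLoop_some0 (text x : String) (l : List String) :
    pvBestLoop text (some (0, x)) l = some (0, x) := by
  induction l with
  | nil => rfl
  | cons o rest ih => simp [pvBestLoop, ih]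

theorem pvLoop_some1 (text x : String) (l : List String) :
    pvBestLoop text (some (1, x)) l =
      match l.find? (fun o => pvScore text o == 0) with
      | some o => some (0, o)
      | none => some (1, x) := by
  induction l with
  | nil => rfl
  | cons o rest ih =>
    by_cases h : pvScore text o = 0
    · simp [pvBestLoop, List.find?, h, pvLoop_some0]
    · have h1 : ¬ pvScore text o < 1 := by omega
      have hb : (pvScore text o == 0) = false := by simp [h]
      simp [pvBestLoop, List.find?, hb, h1, ih]

theorem pvLoop_none (text : String) (l : List String) :
    pvBestLoop text none l =
      match l.find? (fun o => pvScore text o == 0) with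
      | some o => some (0, o)
      | none => (l.find? (fun o => pvScore text o == 1)).map (fun o => (1, o)) := by
  induction l with
  | nil => rfl
  | cons o rest ih =>
    by_cases h0 : pvScore text o = 0
    · simp [pvBestLoop, List.find?, h0, pvLoop_some0]
    · by_cases h1 : pvScore text o = 1
      · simp [pvBestLoop, List.find?, h1, pvLoop_some1]
      · have h2 : ¬ pvScore text o < 2 := by
          have := pvScore_le text o; omega
        have hb0 : (pvScore text o == 0) = false := by simp [h0]
        have hb1 : (pvScore text o == 1) = false := by simp [h1]
        simp [pvBestLoop, List.find?, hb0, hb1, h2, ih]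

theorem pvFind?_congr_mem {α : Type} (l : List α) (p q : α → Bool)
    (h : ∀ a ∈ l, p a = q a) : l.find? p = l.find? q := by
  induction l with
  | nil => rfl
  | cons a t ih =>
    have ha := h a (by simp)
    simp only [List.find?, ha]
    cases q a with
    | true => rfl
    | false => exact ih (fun b hb => h b (by simp [hb]))

theorem pvScore_eq_zero (text o : String) :
    (pvScore text o == 0) = PySem.Str.isIn (PySem.Str.lower o) text := by
  unfold pvScore; dsimp only; split_ifs with h1 h2 <;>
    simp only [Bool.not_eq_true] at * <;> rw [h1] <;> decide

theorem pvScore_eq_one (text o : String)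
    (h : PySem.Str.isIn (PySem.Str.lower o) text = false) :
    (pvScore text o == 1) =
      ((PySem.Str.split₀ (PySem.Str.lower o)).filter (fun w => PySem.Str.len w > 3)).any
        (fun w => PySem.Str.isIn w text) := by
  unfold pvScore; dsimp only; split_ifs with h1 h2
  · rw [h] at h1; cases h1
  · rw [h2]; decide
  · simp only [Bool.not_eq_true] at h2; rw [h2]; decide

-- ===== VERDICT (by name: the statement is the Claim_ definition above) =====
theorem fuzzy_pick_room_type_py_spec : Claim_equal_fuzzy_pick_room_type_py := by
  intro user_text options _
  unfold Spec_fuzzy_pick_room_type_py fuzzy_pick_room_type_py fuzzy_pick_room_type_py_alt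
  dsimp only
  rw [pvLoop_none]
  set text := PySem.Str.lower user_text with htext
  rw [pvFind?_congr_mem options _ _ (fun a _ => pvScore_eq_zero text a)]
  cases hx : options.find? (fun opt => PySem.Str.isIn (PySem.Str.lower opt) text) with
  | some o => simp
  | none =>
    have hall := List.find?_eq_none.mp hx
    rw [pvFind?_congr_mem options (fun o => pvScore text o == 1) _
      (fun a ha => pvScore_eq_one text a (by simpa using hall a ha))]
    cases hy : options.find? (fun opt =>
        ((PySem.Str.split₀ (PySem.Str.lower opt)).filter (fun w => PySem.Str.len w > 3)).any
          (fun w => PySem.Str.isIn w text)) <;> simp
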